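-- pv_equiv track=rewrite | github.com/scorphus/advent-of-code-2020 | aoc/day17/__init__.py | part2
-- ===== SOURCE A (Python) =====
-- import itertools
--
-- def part2(lines):
--     space = set()
--     for x, line in enumerate(lines):
--         for y, cube in enumerate(line):
--             if cube == "#":
--                 space.add((x, y, 0, 0))
--     for _ in range(6):
--         space = cycle(space, 4)
--     return len(space)
--
-- def cycle(space, dim=3):
--     active, next_space = {}, set()
--     for cube in space:
--         for deltas in itertools.product((-1, 0, 1), repeat=dim):
--             if any(deltas):
--                 neighbor = tuple(c + d for c, d in zip(cube, deltas))
--                 active[neighbor] = active.get(neighbor, 0) + 1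
--     for cube, neighbors in active.items():
--         if neighbors == 3 or neighbors == 2 and cube in space:
--             next_space.add(cube)
--     return next_space
-- ===== SOURCE B (Python) =====
-- from itertools import product
--
-- _DELTAS = [d for d in product((-1, 0, 1), repeat=4) if any(d)]
--
-- def part2(lines):
--     space = {(x, y, 0, 0)
--              for x, line in enumerate(lines)
--              for y, cube in enumerate(line) if cube == "#"}
--     for _ in range(6):
--         candidates = {(c[0] + a, c[1] + b, c[2] + cc, c[3] + dd)
--                       for c in space for a, b, cc, dd in _DELTAS}
--         space = {c for c in candidates
--                  if (n := sum((c[0] + a, c[1] + b, c[2] + cc, c[3] + dd) in space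
--                               for a, b, cc, dd in _DELTAS)) == 3
--                  or (n == 2 and c in space)}
--     return len(space)
-- ===== Notes on version B (the rewrite author's own statement) =====
-- stated objective: alternative
-- what changed: The per-cycle scatter pass (increment a neighbor-count dict from each active cell, then filter its items) is replaced by a gather pass (build a candidate set of all neighbors of active cells, then count each candidate's active neighbors by membership tests); no count dict is accumulated.
import Mathlib
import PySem

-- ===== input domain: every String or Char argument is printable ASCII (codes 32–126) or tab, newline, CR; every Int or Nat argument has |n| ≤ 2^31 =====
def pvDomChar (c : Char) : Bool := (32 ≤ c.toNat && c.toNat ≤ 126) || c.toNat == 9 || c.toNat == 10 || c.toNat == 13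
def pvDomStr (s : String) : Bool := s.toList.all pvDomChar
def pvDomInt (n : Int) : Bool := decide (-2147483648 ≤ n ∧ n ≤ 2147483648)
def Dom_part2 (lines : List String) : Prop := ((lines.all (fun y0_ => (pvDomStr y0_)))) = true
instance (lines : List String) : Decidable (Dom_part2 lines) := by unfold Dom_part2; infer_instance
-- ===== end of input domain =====

-- B replaces A's scatter pass (a dict of neighbor counts incremented from each active cell)
-- by a gather pass (a candidate set of neighbors; each candidate counts its own active
-- neighbors by membership tests); objective: alternative decomposition, same result.
-- Python's set/dict are modelled by Std.HashSet/Std.HashMap; only the final set's SIZE is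
-- returned, and the proofs show it does not depend on any iteration order.

abbrev Cell : Type := Int × Int × Int × Int

def addC (c d : Cell) : Cell := (c.1 + d.1, c.2.1 + d.2.1, c.2.2.1 + d.2.2.1, c.2.2.2 + d.2.2.2)

-- itertools.product((-1, 0, 1), repeat=4), in product order
def prod4 : List Cell :=
  ([-1, 0, 1] : List Int).flatMap fun a =>
    ([-1, 0, 1] : List Int).flatMap fun b =>
      ([-1, 0, 1] : List Int).flatMap fun c =>
        ([-1, 0, 1] : List Int).map fun d => (a, b, c, d)

-- any(deltas)
def anyNZ (d : Cell) : Bool := d.1 != 0 || d.2.1 != 0 || d.2.2.1 != 0 || d.2.2.2 != 0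

-- the initial active set: {(x, y, 0, 0) for '#' cubes} (identical in A and B)
def initSpace (lines : List String) : Std.HashSet Cell :=
  (PySem.List.enumerate lines 0).foldl (fun s p =>
    (PySem.List.enumerate p.2.toList 0).foldl (fun s q =>
      if q.2 = '#' then s.insert ((p.1, q.1, 0, 0) : Cell) else s) s) ∅

-- ===== PORT A =====
-- cycle(space, 4): scatter neighbor counts into a dict, then filter its items
def cycleA (space : Std.HashSet Cell) : Std.HashSet Cell :=
  let active : Std.HashMap Cell Int :=
    space.toList.foldl (fun d cube =>
      prod4.foldl (fun d δ =>
        if anyNZ δ then d.insert (addC cube δ) (d.getD (addC cube δ) 0 + 1) else d) d) ∅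
  active.toList.foldl (fun ns p =>
    if p.2 = 3 ∨ (p.2 = 2 ∧ p.1 ∈ space) then ns.insert p.1 else ns) ∅

def part2 (lines : List String) : Int :=
  (((PySem.List.pyRange 0 6 1).foldl (fun sp _ => cycleA sp) (initSpace lines)).size : Int)

-- ===== PORT B =====
-- _DELTAS = [d for d in product((-1,0,1), repeat=4) if any(d)]
def deltasNZ : List Cell := prod4.filter anyNZ

def nbrs (c : Cell) : List Cell := deltasNZ.map (addC c)

-- gather pass: candidates = neighbors of active cells; count by membership
def cycleB (space : Std.HashSet Cell) : Std.HashSet Cell :=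
  let cands : Std.HashSet Cell :=
    space.toList.foldl (fun s c => (nbrs c).foldl (fun s n => s.insert n) s) ∅
  cands.toList.foldl (fun ns c =>
    let n := (nbrs c).countP (fun m => decide (m ∈ space))
    if n = 3 ∨ (n = 2 ∧ c ∈ space) then ns.insert c else ns) ∅

def part2_alt (lines : List String) : Int :=
  (((PySem.List.pyRange 0 6 1).foldl (fun sp _ => cycleB sp) (initSpace lines)).size : Int)

-- ===== PRECONDITION & SPEC =====
def Spec_part2 (lines : List String) (out : Int) : Prop := out = part2_alt lines
instance (lines : List String) (out : Int) : Decidable (Spec_part2 lines out) := by unfold Spec_part2; infer_instance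

-- ===== CLAIM (what is proved, stated in full; the proofs are below) =====
def Claim_equal_part2 : Prop := ∀ (lines : List String), Dom_part2 lines → Spec_part2 lines (part2 lines)

-- ===== LEMMAS AND PROOFS =====

-- neighbor offsets are distinct
theorem nodup_deltas : deltasNZ.Nodup := by decide

-- deltasNZ is closed under negation
theorem neg_mem_deltas : ∀ d ∈ deltasNZ, ((-d.1, -d.2.1, -d.2.2.1, -d.2.2.2) : Cell) ∈ deltasNZ := by decide

theorem addC_inj (c : Cell) : Function.Injective (addC c) := by
  intro x y h
  cases x; cases y
  simp [addC, Prod.ext_iff] at h ⊢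
  omega

theorem nodup_nbrs (c : Cell) : (nbrs c).Nodup :=
  nodup_deltas.map (addC_inj c)

theorem mem_nbrs_symm_aux (a b : Cell) : a ∈ nbrs b → b ∈ nbrs a := by
  intro h
  simp only [nbrs, List.mem_map] at h ⊢
  obtain ⟨d, hd, rfl⟩ := h
  refine ⟨(-d.1, -d.2.1, -d.2.2.1, -d.2.2.2), neg_mem_deltas d hd, ?_⟩
  cases b; cases d
  simp [addC]

theorem mem_nbrs_symm (a b : Cell) : a ∈ nbrs b ↔ b ∈ nbrs a :=
  ⟨mem_nbrs_symm_aux a b, mem_nbrs_symm_aux b a⟩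

-- generic: a fold with a guarded step is a fold over the filtered-mapped list
theorem foldl_ite_filter_map {β γ : Type} (l : List β) (p : β → Bool) (f : β → Cell)
    (g : γ → Cell → γ) (d : γ) :
    l.foldl (fun d x => if p x then g d (f x) else d) d = ((l.filter p).map f).foldl g d := by
  induction l generalizing d with
  | nil => rfl
  | cons x xs ih =>
    simp only [List.foldl_cons, List.filter_cons]
    by_cases h : p x = true
    · simp [h, ih]
    · simp [h, ih]

-- generic: nested folds are a fold over the flatMap
theorem foldl_flatMap_eq {β γ : Type} (l : List β) (f : β → List Cell) (g : γ → Cell → γ) (d : γ) :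
    l.foldl (fun d x => (f x).foldl g d) d = (l.flatMap f).foldl g d := by
  induction l generalizing d with
  | nil => rfl
  | cons x xs ih => simp [List.flatMap_cons, List.foldl_append, ih]

-- count of c in the flattened neighbor list = number of active cells having c as a neighbor
theorem count_flatMap_nbrs (space : List Cell) (c : Cell) :
    (space.flatMap nbrs).count c = space.countP (fun cube => decide (c ∈ nbrs cube)) := by
  induction space with
  | nil => rfl
  | cons x xs ih =>
    rw [List.flatMap_cons, List.count_append, List.countP_cons, ih]
    by_cases h : c ∈ nbrs x
    · rw [List.count_eq_one_of_mem (nodup_nbrs x) h]; simp [h]; omega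
    · rw [List.count_eq_zero.2 h]; simp [h]

-- double counting over two duplicate-free lists
theorem countP_mem_comm {L N : List Cell} (hL : L.Nodup) (hN : N.Nodup) :
    L.countP (fun x => decide (x ∈ N)) = N.countP (fun x => decide (x ∈ L)) := by
  rw [List.countP_eq_length_filter, List.countP_eq_length_filter]
  refine List.Perm.length_eq ?_
  refine (List.perm_ext_iff_of_nodup (hL.filter _) (hN.filter _)).2 ?_
  intro a
  simp only [List.mem_filter, decide_eq_true_eq]
  tauto

-- the number of active neighbors of c, gather-style
def cntN (s : Std.HashSet Cell) (c : Cell) : Nat := (nbrs c).countP (fun m => decide (m ∈ s))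

-- the next-generation rule, phrased gather-style
def ruleN (s : Std.HashSet Cell) (c : Cell) : Prop := cntN s c = 3 ∨ (cntN s c = 2 ∧ c ∈ s)

-- a HashSet's toList is duplicate-free
theorem nodup_toList (s : Std.HashSet Cell) : s.toList.Nodup := by
  have h := Std.HashSet.distinct_toList (m := s)
  exact h.imp (fun hab => by simpa using hab)

theorem cntN_eq_scatter (s : Std.HashSet Cell) (c : Cell) :
    cntN s c = s.toList.countP (fun cube => decide (c ∈ nbrs cube)) := by
  rw [cntN]
  have h1 : (nbrs c).countP (fun m => decide (m ∈ s))
      = (nbrs c).countP (fun m => decide (m ∈ s.toList)) :=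
    List.countP_congr (fun m _ => by simp [Std.HashSet.mem_toList])
  rw [h1, countP_mem_comm (nodup_nbrs c) (nodup_toList s)]
  exact List.countP_congr (fun x _ => by simp [mem_nbrs_symm])

-- the scatter dict: lookups after the increment loop
theorem getD_scatter (l : List Cell) (d : Std.HashMap Cell Int) (c : Cell) :
    (l.foldl (fun d n => d.insert n (d.getD n 0 + 1)) d).getD c 0 = d.getD c 0 + (l.count c : Int) := by
  induction l generalizing d with
  | nil => simp
  | cons x xs ih =>
    rw [List.foldl_cons, ih, List.count_cons]
    by_cases h : x = c
    · subst h
      rw [Std.HashMap.getD_insert]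
      simp
      omega
    · rw [Std.HashMap.getD_insert]
      simp [h]

theorem mem_scatter (l : List Cell) (d : Std.HashMap Cell Int) (c : Cell) :
    (c ∈ l.foldl (fun d n => d.insert n (d.getD n 0 + 1)) d) ↔ c ∈ l ∨ c ∈ d := by
  induction l generalizing d with
  | nil => simp
  | cons x xs ih =>
    rw [List.foldl_cons, ih]
    simp only [Std.HashMap.mem_insert, beq_iff_eq, List.mem_cons]
    constructor
    · rintro (h | (h | h))
      · exact Or.inl (Or.inr h)
      · exact Or.inl (Or.inl h.symm)
      · exact Or.inr h
    · rintro ((h | h) | h)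
      · exact Or.inr (Or.inl h.symm)
      · exact Or.inl h
      · exact Or.inr (Or.inr h)

-- generic guarded insert-fold over a HashSet
theorem mem_foldl_ite_insert {β : Type} (l : List β) (p : β → Prop) [DecidablePred p]
    (f : β → Cell) (s : Std.HashSet Cell) (y : Cell) :
    (y ∈ l.foldl (fun s x => if p x then s.insert (f x) else s) s) ↔
      y ∈ s ∨ ∃ x ∈ l, p x ∧ y = f x := by
  induction l generalizing s with
  | nil => simp
  | cons x xs ih =>
    simp only [List.foldl_cons, List.mem_cons]
    by_cases h : p x
    · simp only [if_pos h, ih, Std.HashSet.mem_insert, beq_iff_eq]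
      constructor
      · rintro (⟨h1 | h1⟩ | ⟨z, hz, hpz, rfl⟩)
        · exact Or.inr ⟨x, Or.inl rfl, h, h1.symm⟩
        · exact Or.inl h1
        · exact Or.inr ⟨z, Or.inr hz, hpz, rfl⟩
      · rintro (h1 | ⟨z, (rfl | hz), hpz, rfl⟩)
        · exact Or.inl (Or.inr h1)
        · exact Or.inl (Or.inl rfl)
        · exact Or.inr ⟨z, hz, hpz, rfl⟩
    · simp only [if_neg h, ih]
      constructor
      · rintro (h1 | ⟨z, hz, hpz, rfl⟩)
        · exact Or.inl h1
        · exact Or.inr ⟨z, Or.inr hz, hpz, rfl⟩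
      · rintro (h1 | ⟨z, (rfl | hz), hpz, rfl⟩)
        · exact Or.inl h1
        · exact absurd hpz h
        · exact Or.inr ⟨z, hz, hpz, rfl⟩

-- the candidate-set fold of B
theorem mem_cands (space : List Cell) (s0 : Std.HashSet Cell) (y : Cell) :
    (y ∈ space.foldl (fun s c => (nbrs c).foldl (fun s n => s.insert n) s) s0) ↔
      y ∈ s0 ∨ ∃ c ∈ space, y ∈ nbrs c := by
  induction space generalizing s0 with
  | nil => simp
  | cons x xs ih =>
    simp only [List.foldl_cons, ih, List.mem_cons]
    have hin : (y ∈ (nbrs x).foldl (fun s n => s.insert n) s0) ↔ y ∈ s0 ∨ y ∈ nbrs x := by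
      have := mem_foldl_ite_insert (nbrs x) (fun _ => True) id s0 y
      simpa using this
    rw [hin]
    constructor
    · rintro ((h | h) | ⟨c, hc, hn⟩)
      · exact Or.inl h
      · exact Or.inr ⟨x, Or.inl rfl, h⟩
      · exact Or.inr ⟨c, Or.inr hc, hn⟩
    · rintro (h | ⟨c, (rfl | hc), hn⟩)
      · exact Or.inl (Or.inl h)
      · exact Or.inl (Or.inr hn)
      · exact Or.inr ⟨c, hc, hn⟩

theorem mem_cycleA (space : Std.HashSet Cell) (c : Cell) :
    c ∈ cycleA space ↔ ruleN space c := by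
  have hflat : (space.toList.foldl (fun d cube =>
      prod4.foldl (fun d δ =>
        if anyNZ δ then d.insert (addC cube δ) (d.getD (addC cube δ) 0 + 1) else d) d)
      (∅ : Std.HashMap Cell Int))
      = (space.toList.flatMap nbrs).foldl (fun d n => d.insert n (d.getD n 0 + 1)) ∅ := by
    have h1 : ∀ (d : Std.HashMap Cell Int) (cube : Cell),
        prod4.foldl (fun d δ =>
          if anyNZ δ then d.insert (addC cube δ) (d.getD (addC cube δ) 0 + 1) else d) d
        = (nbrs cube).foldl (fun d n => d.insert n (d.getD n 0 + 1)) d := by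
      intro d cube
      rw [foldl_ite_filter_map prod4 anyNZ (addC cube) (fun d n => d.insert n (d.getD n 0 + 1)) d]
      rfl
    simp only [h1]
    rw [foldl_flatMap_eq]
  have hcnt : ∀ k : Cell, (space.toList.flatMap nbrs).count k = cntN space k := by
    intro k
    rw [count_flatMap_nbrs, cntN_eq_scatter]
  simp only [cycleA]
  rw [hflat]
  rw [mem_foldl_ite_insert _ (fun p : Cell × Int => p.2 = 3 ∨ (p.2 = 2 ∧ p.1 ∈ space)) Prod.fst]
  have hmemtl : ∀ (p : Cell × Int),
      p ∈ ((space.toList.flatMap nbrs).foldl (fun d n => d.insert n (d.getD n 0 + 1))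
        (∅ : Std.HashMap Cell Int)).toList
      ↔ p.1 ∈ space.toList.flatMap nbrs ∧ p.2 = ((space.toList.flatMap nbrs).count p.1 : Int) := by
    intro p
    cases p with
    | mk k v =>
      rw [Std.HashMap.mem_toList_iff_getElem?_eq_some]
      dsimp only
      have hget : (((space.toList.flatMap nbrs).foldl (fun d n => d.insert n (d.getD n 0 + 1))
          (∅ : Std.HashMap Cell Int)).getD k 0)
          = ((space.toList.flatMap nbrs).count k : Int) := by
        rw [getD_scatter]; simp
      constructor
      · intro h
        have hm : k ∈ (space.toList.flatMap nbrs).foldl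
            (fun d n => d.insert n (d.getD n 0 + 1)) (∅ : Std.HashMap Cell Int) := by
          rw [Std.HashMap.mem_iff_isSome_getElem?, h]; rfl
        have hk : k ∈ space.toList.flatMap nbrs := by
          rcases (mem_scatter _ _ _).1 hm with h1 | h1
          · exact h1
          · exact absurd h1 (Std.HashMap.not_mem_empty)
        refine ⟨hk, ?_⟩
        have := Std.HashMap.getD_eq_getD_getElem?
          (m := (space.toList.flatMap nbrs).foldl (fun d n => d.insert n (d.getD n 0 + 1))
            (∅ : Std.HashMap Cell Int)) (a := k) (fallback := 0)
        rw [h] at this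
        simp only [Option.getD_some] at this
        rw [← this, hget]
      · rintro ⟨hk, rfl⟩
        have hm : k ∈ (space.toList.flatMap nbrs).foldl
            (fun d n => d.insert n (d.getD n 0 + 1)) (∅ : Std.HashMap Cell Int) :=
          (mem_scatter _ _ _).2 (Or.inl hk)
        obtain ⟨v, hv⟩ := Option.isSome_iff_exists.1
          ((Std.HashMap.mem_iff_isSome_getElem?).1 hm)
        rw [hv]
        have := Std.HashMap.getD_eq_getD_getElem?
          (m := (space.toList.flatMap nbrs).foldl (fun d n => d.insert n (d.getD n 0 + 1))
            (∅ : Std.HashMap Cell Int)) (a := k) (fallback := 0)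
        rw [hv] at this
        simp only [Option.getD_some] at this
        rw [← this, hget]
  constructor
  · rintro (h | ⟨x, hx, hrule, rfl⟩)
    · exact absurd h (Std.HashSet.not_mem_empty)
    · obtain ⟨hk, hv⟩ := (hmemtl x).1 hx
      unfold ruleN
      rw [hv] at hrule
      rcases hrule with h3 | ⟨h2, hmem⟩
      · refine Or.inl ?_
        rw [← hcnt]
        exact_mod_cast h3
      · refine Or.inr ⟨?_, hmem⟩
        rw [← hcnt]
        exact_mod_cast h2
  · intro hr
    have hpos : 0 < (space.toList.flatMap nbrs).count c := by
      rw [hcnt]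
      unfold ruleN at hr
      rcases hr with h3 | ⟨h2, -⟩ <;> omega
    have hk : c ∈ space.toList.flatMap nbrs := List.count_pos_iff.1 hpos
    refine Or.inr ⟨(c, ((space.toList.flatMap nbrs).count c : Int)), ?_, ?_, rfl⟩
    · exact (hmemtl _).2 ⟨hk, rfl⟩
    · dsimp only
      unfold ruleN at hr
      rcases hr with h3 | ⟨h2, hmem⟩
      · exact Or.inl (by rw [hcnt, h3]; rfl)
      · exact Or.inr ⟨by rw [hcnt, h2]; rfl, hmem⟩

theorem mem_cycleB (space : Std.HashSet Cell) (c : Cell) :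
    c ∈ cycleB space ↔ ruleN space c := by
  simp only [cycleB]
  rw [mem_foldl_ite_insert _ (fun c : Cell =>
    (nbrs c).countP (fun m => decide (m ∈ space)) = 3 ∨
      ((nbrs c).countP (fun m => decide (m ∈ space)) = 2 ∧ c ∈ space)) (fun c => c)]
  constructor
  · rintro (h | ⟨x, hx, hrule, rfl⟩)
    · exact absurd h (Std.HashSet.not_mem_empty)
    · exact hrule
  · intro hr
    refine Or.inr ⟨c, ?_, hr, rfl⟩
    rw [Std.HashSet.mem_toList, mem_cands]
    have hpos : 0 < cntN space c := by
      unfold ruleN at hr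
      rcases hr with h3 | ⟨h2, -⟩ <;> omega
    obtain ⟨m, hm, hms⟩ := List.countP_pos_iff.1 hpos
    exact Or.inr ⟨m, Std.HashSet.mem_toList.2 (by simpa using hms), (mem_nbrs_symm c m).2 hm⟩

-- one matched step, then iterate: A's and B's evolutions stay equal as sets
theorem fold_cycles (l : List Int) (L L' : Std.HashSet Cell)
    (h : ∀ x, x ∈ L ↔ x ∈ L') :
    ∀ x, x ∈ l.foldl (fun sp _ => cycleA sp) L ↔ x ∈ l.foldl (fun sp _ => cycleB sp) L' := by
  induction l generalizing L L' with
  | nil => exact h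
  | cons a as ih =>
    simp only [List.foldl_cons]
    refine ih _ _ ?_
    intro x
    rw [mem_cycleA L, mem_cycleB L']
    unfold ruleN cntN
    have hc : (nbrs x).countP (fun m => decide (m ∈ L))
        = (nbrs x).countP (fun m => decide (m ∈ L')) :=
      List.countP_congr (fun m _ => by simp [h m])
    rw [hc, h x]

-- sets with the same members have the same size
theorem size_eq_of_mem_iff (s t : Std.HashSet Cell) (h : ∀ x, x ∈ s ↔ x ∈ t) :
    s.size = t.size := by
  rw [← Std.HashSet.length_toList, ← Std.HashSet.length_toList]
  refine List.Perm.length_eq ?_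
  refine (List.perm_ext_iff_of_nodup (nodup_toList s) (nodup_toList t)).2 ?_
  intro a
  rw [Std.HashSet.mem_toList, Std.HashSet.mem_toList]
  exact h a

-- ===== VERDICT (by name: the statement is the Claim_ definition above) =====
theorem part2_spec : Claim_equal_part2 := by
  intro lines _
  show part2 lines = part2_alt lines
  simp only [part2, part2_alt]
  exact congrArg _ (size_eq_of_mem_iff _ _
    (fold_cycles (PySem.List.pyRange 0 6 1) (initSpace lines) (initSpace lines) (fun _ => Iff.rfl)))
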